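-- pv_equiv track=rewrite | github.com/nehalkarrar/codeSignal | contiguous subarrays.py | solution
-- ===== SOURCE A (Python) =====
-- def solution(arr):
--
--     x = 1
--
--     while x <= len(arr):
--         test_arr = arr[:x]
--         test_arr.sort(reverse = True)
--         if arr[:x] == test_arr:
--             res = []
--             res.extend(arr[:x])
--         else:
--             break
--         x += 1
--
--     count = 0
--     for i in range(len(res)):
--         for j in range(i+1, len(res)):
--             if res[i] > res[j]:
--                 count += 1
--
--     if count == 0:
--         return len(arr)
--     else:
--         return count+len(res)
-- ===== SOURCE B (Python) =====
-- def solution(arr):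
--     # One pass: walk the longest non-increasing prefix, tracking its length L,
--     # the current equal-value run length, and the number of equal pairs inside runs.
--     # Strict inversions in a non-increasing list = C(L,2) - equal pairs.
--     L = 0
--     run = 0
--     dup_pairs = 0
--     prev = None
--     for v in arr:
--         if L > 0 and v > prev:
--             break
--         if L > 0 and v == prev:
--             run += 1
--         else:
--             run = 1
--         dup_pairs += run - 1
--         L += 1
--         prev = v
--     count = L * (L - 1) // 2 - dup_pairs
--     if count == 0:
--         return len(arr)
--     return count + L
-- ===== Notes on version B (the rewrite author's own statement) =====
-- stated objective: faster
-- what changed: A re-sorts every prefix to test monotonicity and then counts inversions with a double loop; B finds the longest non-increasing prefix in one left-to-right pass, tracking run lengths of equal values, and gets the inversion count as C(L,2) minus within-run equal pairs.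
import Mathlib
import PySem

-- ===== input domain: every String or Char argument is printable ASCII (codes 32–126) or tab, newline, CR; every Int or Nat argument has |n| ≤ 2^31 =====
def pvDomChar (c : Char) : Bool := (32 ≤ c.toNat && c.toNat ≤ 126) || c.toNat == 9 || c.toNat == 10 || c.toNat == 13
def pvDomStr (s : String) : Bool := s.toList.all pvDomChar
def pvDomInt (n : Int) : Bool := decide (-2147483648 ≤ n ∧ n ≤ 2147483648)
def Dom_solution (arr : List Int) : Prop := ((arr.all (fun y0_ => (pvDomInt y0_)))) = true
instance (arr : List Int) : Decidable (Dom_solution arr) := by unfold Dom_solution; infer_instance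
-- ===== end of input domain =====

-- B replaces A's sort-every-prefix + double-loop inversion count by a single O(n) pass over run lengths.

-- ===== PORT A =====
def solutionLoopA (arr : List Int) : Nat → Nat → Option (List Int) → Option (List Int)
  | 0, _, res => res
  | fuel+1, x, res =>
    if x ≤ arr.length then
      let t := PySem.List.slice arr none (some (x : Int))
      if t = PySem.List.sorted t (fun y => y) true then
        solutionLoopA arr fuel (x+1) (some t)
      else res
    else res

def solution (arr : List Int) : Int :=
  let res : List Int := (solutionLoopA arr (arr.length + 1) 1 none).getD []
  let count : Int :=
    (PySem.List.pyRange 0 (PySem.List.len res) 1).foldl (fun c i =>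
      (PySem.List.pyRange (i+1) (PySem.List.len res) 1).foldl (fun c2 j =>
        if PySem.List.pyGetD res i 0 > PySem.List.pyGetD res j 0 then c2 + 1 else c2) c) 0
  if count = 0 then PySem.List.len arr else count + PySem.List.len res

-- ===== PORT B =====
def solutionLoopB : List Int → Option Int → Nat → Nat → Nat → Nat × Nat
  | [], _, L, _run, dup => (L, dup)
  | v :: rest, prev, L, run, dup =>
    match prev with
    | none =>
        let run' := 1
        solutionLoopB rest (some v) (L + 1) run' (dup + (run' - 1))
    | some p =>
        if p < v then (L, dup)
        else
          let run' := if v = p then run + 1 else 1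
          solutionLoopB rest (some v) (L + 1) run' (dup + (run' - 1))

def solution_alt (arr : List Int) : Int :=
  let r := solutionLoopB arr none 0 0 0
  let count : Int := PySem.Int.floordiv ((r.1 : Int) * ((r.1 : Int) - 1)) 2 - (r.2 : Int)
  if count = 0 then PySem.List.len arr else count + (r.1 : Int)

-- ===== PRECONDITION & SPEC =====
-- Pre_ excludes only the empty list, on which A raises UnboundLocalError (res is never assigned).
def Pre_solution (arr : List Int) : Prop := arr ≠ []
instance (arr : List Int) : Decidable (Pre_solution arr) := by unfold Pre_solution; infer_instance
def pvWitness_solution : List Int := [3, 1]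

def Spec_solution (arr : List Int) (out : Int) : Prop := out = solution_alt arr
instance (arr : List Int) (out : Int) : Decidable (Spec_solution arr out) := by unfold Spec_solution; infer_instance

-- ===== CLAIM (what is proved, stated in full; the proofs are below) =====
def Claim_equal_solution : Prop := ∀ (arr : List Int), Dom_solution arr → Pre_solution arr → Spec_solution arr (solution arr)

-- ===== LEMMAS AND PROOFS =====

-- the non-increasing prefix of a list (helper for both proofs)
def prefF (p : Int) : List Int → List Int
  | [] => []
  | b :: l => if b ≤ p then b :: prefF b l else []

def pf : List Int → List Int
  | [] => []
  | a :: t => a :: prefF a t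

-- inversion-count spec: number of pairs i < j with l[i] > l[j]
def invSpec : List Int → Nat
  | [] => 0
  | a :: l => l.countP (fun b => decide (b < a)) + invSpec l

-- "n choose 2", recursively
def C2 : Nat → Nat
  | 0 => 0
  | n + 1 => C2 n + n

theorem prefF_prefix (l : List Int) : ∀ p, prefF p l <+: l := by
  induction l with
  | nil => intro p; simp [prefF]
  | cons b t ih =>
    intro p
    by_cases h : b ≤ p
    · simpa [prefF, h] using (List.prefix_cons_inj b).mpr (ih b)
    · simp [prefF, h]

theorem pf_prefix (arr : List Int) : pf arr <+: arr := by
  cases arr with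
  | nil => simp [pf]
  | cons a t => simpa [pf] using (List.prefix_cons_inj a).mpr (prefF_prefix t a)

theorem pf_pairwise_from (l : List Int) : ∀ p, (p :: prefF p l).Pairwise (fun a b => b ≤ a) := by
  induction l with
  | nil => intro p; simp [prefF]
  | cons b t ih =>
    intro p
    by_cases h : b ≤ p
    · have hb := ih b
      rw [List.pairwise_cons] at hb
      simp only [prefF, h, if_pos]
      rw [List.pairwise_cons]
      refine ⟨?_, ih b⟩
      intro x hx
      rcases List.mem_cons.mp hx with rfl | hx
      · exact h
      · exact le_trans (hb.1 x hx) h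
    · simp [prefF, h]

theorem pf_pairwise (arr : List Int) : (pf arr).Pairwise (fun a b => b ≤ a) := by
  cases arr with
  | nil => simp [pf]
  | cons a t => simpa [pf] using pf_pairwise_from t a

theorem pf_maximal (l : List Int) : ∀ (p : Int) (x : Nat), x ≤ l.length →
    ((p :: l.take x).Pairwise (fun a b => b ≤ a)) → x ≤ (prefF p l).length := by
  induction l with
  | nil => intro p x hx _; simp at hx; simp [hx]
  | cons b t ih =>
    intro p x hx hpa
    cases x with
    | zero => simp
    | succ k =>
      simp only [List.take_succ_cons] at hpa
      rw [List.pairwise_cons] at hpa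
      have hbp : b ≤ p := hpa.1 b (by simp)
      have hk := ih b k (by simpa using hx) hpa.2
      simp only [prefF, hbp, if_pos, List.length_cons]
      omega

theorem take_pf (arr : List Int) : arr.take (pf arr).length = pf arr := by
  exact (List.prefix_iff_eq_take.mp (pf_prefix arr)).symm

theorem ni_take_of_le (arr : List Int) (x : Nat) (hx : x ≤ (pf arr).length) :
    (arr.take x).Pairwise (fun a b => b ≤ a) := by
  have e : (arr.take (pf arr).length).take x = arr.take x := by
    rw [List.take_take, min_eq_left hx]
  rw [← e, take_pf]
  exact List.Pairwise.sublist (List.take_sublist x _) (pf_pairwise arr)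

theorem sorted_char (t : List Int) :
    (t = PySem.List.sorted t (fun y => y) true) ↔ t.Pairwise (fun a b => b ≤ a) := by
  constructor
  · intro h; rw [h]; simpa using PySem.List.sorted_pairwise_rev t (fun y => y)
  · intro h; exact (PySem.List.sorted_rev_eq_self_of_pairwise t (fun y => y) (by simpa using h)).symm

theorem ni_take_le (arr : List Int) (x : Nat) (hx : x ≤ arr.length) (h1 : 1 ≤ x)
    (hni : (arr.take x).Pairwise (fun a b => b ≤ a)) : x ≤ (pf arr).length := by
  cases arr with
  | nil => simp at hx; omega
  | cons a t =>
    cases x with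
    | zero => omega
    | succ k =>
      simp only [List.take_succ_cons] at hni
      have := pf_maximal t a k (by simpa using hx) hni
      simp only [pf, List.length_cons]
      omega

theorem pf_len_pos (a : Int) (t : List Int) : 1 ≤ (pf (a :: t)).length := by
  simp [pf]

theorem loopA_aux (arr : List Int) (hP1 : 1 ≤ (pf arr).length) :
    ∀ (fuel x : Nat) (res : Option (List Int)),
    1 ≤ x → x ≤ (pf arr).length + 1 →
    (x = 1 ∧ res = none ∨ 2 ≤ x ∧ res = some (arr.take (x - 1))) →
    arr.length + 1 - x ≤ fuel →
    solutionLoopA arr fuel x res = some (arr.take (pf arr).length) := by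
  have hPlen : (pf arr).length ≤ arr.length := List.IsPrefix.length_le (pf_prefix arr)
  intro fuel
  induction fuel with
  | zero =>
    intro x res hx1 hxP hres hfuel
    have hx : x = (pf arr).length + 1 ∧ (pf arr).length = arr.length := by omega
    rcases hres with ⟨h1, _⟩ | ⟨h2, hsome⟩
    · omega
    · simp only [solutionLoopA, hsome]
      congr 2
      omega
  | succ f ih =>
    intro x res hx1 hxP hres hfuel
    by_cases hxl : x ≤ arr.length
    · have hslice : PySem.List.slice arr none (some (x : Int)) = arr.take x :=
        PySem.List.slice_to_natCast arr x
      by_cases hcond : x ≤ (pf arr).length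
      · have hni : (arr.take x).Pairwise (fun a b => b ≤ a) := ni_take_of_le arr x hcond
        have hsortEq : arr.take x = PySem.List.sorted (arr.take x) (fun y => y) true :=
          (sorted_char (arr.take x)).mpr hni
        show solutionLoopA arr (f + 1) x res = some (arr.take (pf arr).length)
        rw [solutionLoopA]
        rw [if_pos hxl, hslice, if_pos hsortEq]
        exact ih (x + 1) (some (arr.take x)) (by omega) (by omega)
          (Or.inr ⟨by omega, by simp⟩) (by omega)
      · have hxP1 : x = (pf arr).length + 1 := by omega
        have hnotni : ¬ (arr.take x).Pairwise (fun a b => b ≤ a) := by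
          intro hni
          exact hcond (ni_take_le arr x hxl hx1 hni)
        have hne : ¬ (arr.take x = PySem.List.sorted (arr.take x) (fun y => y) true) := by
          intro hEq
          exact hnotni ((sorted_char (arr.take x)).mp hEq)
        rcases hres with ⟨h1, _⟩ | ⟨h2, hsome⟩
        · omega
        · rw [solutionLoopA, if_pos hxl, hslice, if_neg hne, hsome]
          congr 2
          omega
    · have hx : x = (pf arr).length + 1 ∧ (pf arr).length = arr.length := by omega
      rcases hres with ⟨h1, _⟩ | ⟨h2, hsome⟩
      · omega
      · rw [solutionLoopA, if_neg hxl, hsome]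
        congr 2
        omega

theorem loopA_spec (arr : List Int) (h : arr ≠ []) :
    solutionLoopA arr (arr.length + 1) 1 none = some (pf arr) := by
  obtain ⟨a, t, rfl⟩ := List.exists_cons_of_ne_nil h
  rw [loopA_aux (a :: t) (pf_len_pos a t) (a :: t).length.succ 1 none (le_refl 1)
    (by have := pf_len_pos a t; omega) (Or.inl ⟨rfl, rfl⟩) (by omega)]
  rw [take_pf]

theorem invSpec_append_singleton (l : List Int) (b : Int) :
    invSpec (l ++ [b]) = invSpec l + l.countP (fun x => decide (b < x)) := by
  induction l with
  | nil => simp [invSpec]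
  | cons a t ih =>
    simp only [List.cons_append, invSpec, ih, List.countP_append, List.countP_cons,
      List.countP_nil]
    by_cases h : b < a <;> simp [h] <;> omega

theorem keyB (l : List Int) : ∀ (c' : List Int) (p : Int) (run dup : Nat),
    (∀ x ∈ c', p < x) → 1 ≤ run →
    dup + invSpec (c' ++ List.replicate run p) = C2 (c'.length + run) →
    (solutionLoopB l (some p) (c'.length + run) run dup).2
        + invSpec ((c' ++ List.replicate run p) ++ prefF p l)
      = C2 ((solutionLoopB l (some p) (c'.length + run) run dup).1)
    ∧ (solutionLoopB l (some p) (c'.length + run) run dup).1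
      = c'.length + run + (prefF p l).length := by
  induction l with
  | nil =>
    intro c' p run dup h1 hrun hinv
    simp [solutionLoopB, prefF, hinv]
  | cons b t ih =>
    intro c' p run dup h1 hrun hinv
    by_cases hbp : p < b
    · have hnle : ¬ b ≤ p := not_le.mpr hbp
      simp [solutionLoopB, hbp, prefF, hnle, hinv]
    · have hble : b ≤ p := not_lt.mp hbp
      by_cases heq : b = p
      · subst heq
        have step : solutionLoopB (b :: t) (some b) (c'.length + run) run dup
            = solutionLoopB t (some b) (c'.length + (run + 1)) (run + 1) (dup + run) := by
          simp [solutionLoopB, Nat.add_assoc]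
        have hc : c' ++ List.replicate (run + 1) b
            = (c' ++ List.replicate run b) ++ [b] := by
          rw [List.replicate_succ', List.append_assoc]
        have hcount : (c' ++ List.replicate run b).countP (fun x => decide (b < x))
            = c'.length := by
          rw [List.countP_append]
          have h0 : (List.replicate run b).countP (fun x => decide (b < x)) = 0 := by simp
          have hl : c'.countP (fun x => decide (b < x)) = c'.length := by
            rw [List.countP_eq_length]; intro x hx; simpa using h1 x hx
          omega
        have hC2 : C2 (c'.length + (run + 1)) = C2 (c'.length + run) + (c'.length + run) := by
          have : c'.length + (run + 1) = (c'.length + run) + 1 := by omega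
          rw [this]; rfl
        have hinv' : (dup + run) + invSpec (c' ++ List.replicate (run + 1) b)
            = C2 (c'.length + (run + 1)) := by
          rw [hc, invSpec_append_singleton, hcount, hC2]
          have hrep : (List.replicate run b).length = run := List.length_replicate
          omega
        have hres := ih c' b (run + 1) (dup + run) h1 (by omega) hinv'
        rw [step]
        have hpr : prefF b (b :: t) = b :: prefF b t := by simp [prefF]
        have happ : (c' ++ List.replicate run b) ++ prefF b (b :: t)
            = (c' ++ List.replicate (run + 1) b) ++ prefF b t := by
          rw [hpr, hc, List.append_assoc, List.append_assoc]
          simp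
        rw [happ]
        refine ⟨hres.1, ?_⟩
        rw [hres.2, hpr]
        simp
        omega
      · have hblt : b < p := lt_of_le_of_ne hble heq
        have step : solutionLoopB (b :: t) (some p) (c'.length + run) run dup
            = solutionLoopB t (some b) (c'.length + run + 1) 1 (dup + 0) := by
          simp [solutionLoopB, hbp, heq]
        set c'' := c' ++ List.replicate run p with hc''
        have hlen : c''.length = c'.length + run := by simp [hc'']
        have h1'' : ∀ x ∈ c'', b < x := by
          intro x hx
          rcases List.mem_append.mp hx with hx | hx
          · exact lt_trans hblt (h1 x hx)
          · rw [List.eq_of_mem_replicate hx]; exact hblt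
        have hcount : c''.countP (fun x => decide (b < x)) = c''.length := by
          rw [List.countP_eq_length]; intro x hx; simpa using h1'' x hx
        have hC2 : C2 (c''.length + 1) = C2 c''.length + c''.length := rfl
        have hinv'' : (dup + 0) + invSpec (c'' ++ List.replicate 1 b)
            = C2 (c''.length + 1) := by
          have : c'' ++ List.replicate 1 b = c'' ++ [b] := rfl
          rw [this, invSpec_append_singleton, hcount, hC2, hlen]
          omega
        have hres := ih c'' b 1 (dup + 0) h1'' (by omega) hinv''
        rw [hlen] at hres
        rw [step]
        have hpr : prefF p (b :: t) = b :: prefF b t := by simp [prefF, hble]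
        have happ : (c' ++ List.replicate run p) ++ prefF p (b :: t)
            = (c'' ++ List.replicate 1 b) ++ prefF b t := by
          rw [hpr, hc'']
          simp [List.append_assoc]
        rw [happ]
        refine ⟨hres.1, ?_⟩
        rw [hres.2, hpr]
        simp
        omega

theorem sum_inv (res : List Int) :
    ((List.range res.length).map (fun k =>
      ((res.drop (k + 1)).countP (fun b => decide (b < res.getD k 0)) : Int))).sum
    = (invSpec res : Int) := by
  induction res with
  | nil => simp [invSpec]
  | cons a t ih =>
    rw [List.length_cons, List.range_succ_eq_map]
    simp only [List.map_cons, List.sum_cons, List.map_map, Function.comp_def,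
      Nat.succ_eq_add_one, List.drop_succ_cons, List.getD_cons_succ, List.getD_cons_zero,
      List.drop_zero]
    rw [ih, invSpec]
    push_cast
    ring

theorem keyA (res : List Int) :
    ((PySem.List.pyRange 0 (PySem.List.len res) 1).foldl (fun c i =>
      (PySem.List.pyRange (i+1) (PySem.List.len res) 1).foldl (fun c2 j =>
        if PySem.List.pyGetD res i 0 > PySem.List.pyGetD res j 0 then c2 + 1 else c2) c) (0 : Int))
    = (invSpec res : Int) := by
  have inner : ∀ (i : Int), 0 ≤ i → ∀ c : Int,
      ((PySem.List.pyRange (i+1) (PySem.List.len res) 1).foldl (fun c2 j =>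
        if PySem.List.pyGetD res i 0 > PySem.List.pyGetD res j 0 then c2 + 1 else c2) c)
      = c + ((res.drop (i.toNat + 1)).countP (fun b => decide (b < PySem.List.pyGetD res i 0)) : Int) := by
    intro i hi c
    rw [PySem.List.foldl_pyRange_pyGetD res 0
      (fun c2 y => if PySem.List.pyGetD res i 0 > y then c2 + 1 else c2) c (by omega)]
    have e : (fun (c2 y : Int) => if PySem.List.pyGetD res i 0 > y then c2 + 1 else c2)
        = (fun (c2 y : Int) =>
            if (decide (PySem.List.pyGetD res i 0 > y)) = true then c2 + 1 else c2) := by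
      funext c2 y; simp
    rw [e, PySem.List.foldl_count_if (fun y => decide (PySem.List.pyGetD res i 0 > y)) _ c]
    have e2 : (i + 1).toNat = i.toNat + 1 := by omega
    rw [e2]
  rw [PySem.List.foldl_congr_mem _ _
    (fun (c : Int) (i : Int) =>
      c + ((res.drop (i.toNat + 1)).countP (fun b => decide (b < PySem.List.pyGetD res i 0)) : Int)) 0
    (by
      intro acc x hx
      have hx0 : 0 ≤ x := by
        have := (PySem.List.mem_pyRange_one.mp hx).1
        omega
      exact inner x hx0 acc)]
  rw [PySem.List.foldl_add]
  simp only [PySem.List.len_eq, PySem.List.pyRange_zero_natCast, List.map_map, zero_add]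
  simp only [Function.comp_def, PySem.List.pyGetD_natCast, Int.toNat_natCast]
  exact sum_inv res

theorem two_mul_C2 (n : Nat) : 2 * C2 n = n * (n - 1) := by
  induction n with
  | zero => rfl
  | succ m ih =>
    cases m with
    | zero => rfl
    | succ k =>
      simp only [C2] at *
      have : (k + 1 + 1) * (k + 1 + 1 - 1) = (k + 1) * (k + 1 - 1) + 2 * (k + 1) := by
        simp only [Nat.add_sub_cancel]; ring
      omega

theorem C2_cast (n : Nat) :
    PySem.Int.floordiv ((n : Int) * ((n : Int) - 1)) 2 = (C2 n : Int) := by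
  cases n with
  | zero => decide
  | succ m =>
    have e : ((m + 1 : Nat) : Int) * (((m + 1 : Nat) : Int) - 1) = (((m + 1) * m : Nat) : Int) := by
      push_cast; ring
    rw [e, show ((2 : Int)) = ((2 : Nat) : Int) from rfl, PySem.Int.floordiv_natCast]
    have h2 := two_mul_C2 (m + 1)
    simp only [Nat.add_sub_cancel] at h2
    congr 1
    omega

theorem loopB_spec (a : Int) (t : List Int) :
    (solutionLoopB (a :: t) none 0 0 0).1 = (pf (a :: t)).length ∧
    (solutionLoopB (a :: t) none 0 0 0).2 + invSpec (pf (a :: t))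
      = C2 ((pf (a :: t)).length) := by
  have step : solutionLoopB (a :: t) none 0 0 0 = solutionLoopB t (some a) 1 1 0 := by
    simp [solutionLoopB]
  have h := keyB t [] a 1 0 (by simp) (le_refl 1) (by simp [invSpec, C2])
  simp only [List.length_nil, List.nil_append, List.replicate_one, Nat.zero_add,
    List.singleton_append] at h
  rw [step, pf]
  simp only [List.length_cons]
  constructor
  · rw [h.2]; omega
  · have e : (prefF a t).length + 1 = 1 + (prefF a t).length := by omega
    rw [e, ← h.2]
    exact h.1

-- ===== VERDICT (by name: the statement is the Claim_ definition above) =====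
theorem solution_spec : Claim_equal_solution := by
  intro arr hdom hpre
  unfold Spec_solution
  obtain ⟨a, t, rfl⟩ := List.exists_cons_of_ne_nil hpre
  have hA := loopA_spec (a :: t) hpre
  have hB := loopB_spec a t
  simp only [solution, solution_alt, hA, Option.getD_some]
  rw [keyA (pf (a :: t))]
  have hcnt : PySem.Int.floordiv (((solutionLoopB (a :: t) none 0 0 0).1 : Int) *
      (((solutionLoopB (a :: t) none 0 0 0).1 : Int) - 1)) 2
      - ((solutionLoopB (a :: t) none 0 0 0).2 : Int)
      = (invSpec (pf (a :: t)) : Int) := by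
    rw [hB.1, C2_cast]
    have := hB.2
    omega
  rw [hcnt, hB.1]
  simp only [PySem.List.len_eq]
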